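-- pv_equiv track=rewrite | github.com/anushka369/30-Days-DSA-Bootcamp | DAY 11: ADVANCED SEARCHING/Jack and their enemies/solution.py | min_k_to_kill_enemies
-- ===== SOURCE A (Python) =====
-- def min_k_to_kill_enemies(n, groups, m):
--     total_enemies = sum(groups)
--     low = 1
--     high = total_enemies
--
--     while low < high:
--         mid = (low + high) // 2
--         minutes_needed = 0
--
--         for group in groups:
--             minutes_needed += (group + mid - 1) // mid
--
--         if minutes_needed > m:
--             low = mid + 1
--
--         else:
--             high = mid
--
--     return str(low) + ' ' + oct(low)[2:]
-- ===== SOURCE B (Python) =====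
-- def min_k_to_kill_enemies(n, groups, m):
--     total_enemies = sum(groups)
--     # binary lifting: grow j bit by bit so that j stays the largest value
--     # in [0, total_enemies-1] that is 0 or needs more than m minutes
--     bit = 1
--     while bit * 2 <= total_enemies - 1:
--         bit *= 2
--     j = 0
--     while bit >= 1:
--         cand = j + bit
--         if cand <= total_enemies - 1:
--             minutes_needed = 0
--             for group in groups:
--                 minutes_needed += (group + cand - 1) // cand
--             if minutes_needed > m:
--                 j = cand
--         bit //= 2
--     k = j + 1
--     return str(k) + ' ' + oct(k)[2:]
-- ===== Notes on version B (the rewrite author's own statement) =====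
-- stated objective: alternative
-- what changed: Replaces A's low/high interval bisection with binary lifting: B grows a power-of-two bit and then builds, bit by bit, the largest index whose group-clearing time still exceeds m, returning that index plus one. Pre_ excludes lists that contain a negative group size and sum to at least 2: there sum(ceil(g/k)) is not monotone in k and the value A's bisection probe sequence lands on is accidental.
-- outside the precondition, e.g. on min_k_to_kill_enemies(0, [22, -12, -20, 23], 4): A returns '8 10', B returns '4 4'
import Mathlib
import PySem

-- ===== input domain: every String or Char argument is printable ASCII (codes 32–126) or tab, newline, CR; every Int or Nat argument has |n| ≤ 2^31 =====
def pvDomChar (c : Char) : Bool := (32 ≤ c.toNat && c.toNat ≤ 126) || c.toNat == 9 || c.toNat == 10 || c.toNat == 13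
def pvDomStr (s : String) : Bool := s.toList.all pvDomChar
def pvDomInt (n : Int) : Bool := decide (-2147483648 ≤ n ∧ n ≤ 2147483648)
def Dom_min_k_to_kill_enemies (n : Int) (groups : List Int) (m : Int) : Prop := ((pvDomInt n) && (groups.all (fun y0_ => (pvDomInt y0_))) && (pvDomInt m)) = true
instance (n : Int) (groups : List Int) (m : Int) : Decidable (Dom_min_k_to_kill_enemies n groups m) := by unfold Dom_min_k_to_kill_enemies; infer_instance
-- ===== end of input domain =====

-- B replaces A's low/high bisection by binary lifting (grow a power-of-two bit, then build the
-- largest infeasible index bit by bit); same return value on non-negative group lists (objective: alternative).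

-- Shared helpers: both Pythons contain the identical inner minutes loop and the identical
-- 'str(k) + ' ' + oct(k)[2:]' return expression, so both ports share these helpers.

-- minutes_needed inner loop: 'for group in groups: minutes_needed += (group + k - 1) // k'
def pyMinutes (groups : List Int) (k : Int) : Int :=
  groups.foldl (fun acc g => acc + PySem.Int.floordiv (g + k - 1) k) 0

-- octal digits of a natural number, most significant first (hand-written: PySem has no oct; exact for Python's oct digits)
def pyOctDigits (v : Nat) : List Char :=
  if h : v = 0 then [] else pyOctDigits (v / 8) ++ [Char.ofNat (48 + v % 8)]
  termination_by v
  decreasing_by exact Nat.div_lt_self (Nat.pos_of_ne_zero h) (by omega)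

-- oct(k)[2:], exact for every Int k (oct(0)='0o0', oct(-5)='-0o5'; [2:] drops two leading chars)
def pyOctSuffix (k : Int) : String :=
  if k = 0 then "0"
  else if 0 < k then String.ofList (pyOctDigits k.toNat)
  else String.ofList ('o' :: pyOctDigits (-k).toNat)

-- ===== PORT A =====
-- 'while low < high: mid = (low+high)//2; … if minutes_needed > m: low = mid+1 else: high = mid'
def aLoop (groups : List Int) (m low high : Int) : Int :=
  if h : low < high then
    let mid := PySem.Int.floordiv (low + high) 2
    if pyMinutes groups mid > m then aLoop groups m (mid + 1) high
    else aLoop groups m low mid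
  else low
  termination_by (high - low).toNat
  decreasing_by
  · have hb := PySem.Int.floordiv_two_mid_bounds (le_of_lt h)
    omega
  · have hb := PySem.Int.floordiv_two_mid_bounds (le_of_lt h)
    have hlt : PySem.Int.floordiv (low + high) 2 < high := by
      rw [PySem.Int.floordiv_lt_iff_lt_mul (by omega : (0:Int) < 2)]; omega
    omega

def min_k_to_kill_enemies (n : Int) (groups : List Int) (m : Int) : String :=
  let total_enemies := groups.sum
  let low := aLoop groups m 1 total_enemies
  PySem.Int.toStr low ++ " " ++ pyOctSuffix low

-- ===== PORT B =====
-- 'while bit * 2 <= total_enemies - 1: bit *= 2'  ('1 ≤ bit' is a totality guard only: every call has bit ≥ 1)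
def growBit (cap bit : Int) : Int :=
  if h : 1 ≤ bit ∧ bit * 2 ≤ cap then growBit cap (bit * 2) else bit
  termination_by (cap - bit).toNat
  decreasing_by omega

-- 'while bit >= 1: cand = j + bit; if cand <= total-1 and minutes_needed(cand) > m: j = cand; bit //= 2'
def liftLoop (groups : List Int) (m tot j bit : Int) : Int :=
  if h : 1 ≤ bit then
    let j' := if j + bit ≤ tot - 1 ∧ pyMinutes groups (j + bit) > m then j + bit else j
    liftLoop groups m tot j' (PySem.Int.floordiv bit 2)
  else j
  termination_by bit.toNat
  decreasing_by
    have : PySem.Int.floordiv bit 2 < bit := by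
      rw [PySem.Int.floordiv_lt_iff_lt_mul (by omega : (0:Int) < 2)]; omega
    have : 0 ≤ PySem.Int.floordiv bit 2 := by
      rw [PySem.Int.floordiv_eq_ediv_of_pos (by omega : (0:Int) < 2)]; omega
    omega

def min_k_to_kill_enemies_alt (n : Int) (groups : List Int) (m : Int) : String :=
  let total_enemies := groups.sum
  let bit := growBit (total_enemies - 1) 1
  let j := liftLoop groups m total_enemies 0 bit
  let k := j + 1
  PySem.Int.toStr k ++ " " ++ pyOctSuffix k

-- ===== PRECONDITION & SPEC =====
-- Pre_ excludes lists that contain a negative group size and sum to at least 2: there the loops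
-- actually search, sum(ceil(g/k)) is not monotone in k, and the value A's bisection lands on is an
-- accident of its probe sequence (group sizes are naturally non-negative); lists summing to at most 1
-- are kept even with negatives, since neither loop body runs there.
def Pre_min_k_to_kill_enemies (n : Int) (groups : List Int) (m : Int) : Prop :=
  (∀ g ∈ groups, 0 ≤ g) ∨ groups.sum ≤ 1
instance (n : Int) (groups : List Int) (m : Int) : Decidable (Pre_min_k_to_kill_enemies n groups m) := by
  unfold Pre_min_k_to_kill_enemies; infer_instance

def pvWitness_min_k_to_kill_enemies : Int × List Int × Int := (4, [3, 5, 2], 4)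

def Spec_min_k_to_kill_enemies (n : Int) (groups : List Int) (m : Int) (out : String) : Prop := out = min_k_to_kill_enemies_alt n groups m
instance (n : Int) (groups : List Int) (m : Int) (out : String) : Decidable (Spec_min_k_to_kill_enemies n groups m out) := by unfold Spec_min_k_to_kill_enemies; infer_instance

-- ===== CLAIM (what is proved, stated in full; the proofs are below) =====
def Claim_equal_min_k_to_kill_enemies : Prop := ∀ (n : Int) (groups : List Int) (m : Int), Dom_min_k_to_kill_enemies n groups m → Pre_min_k_to_kill_enemies n groups m → Spec_min_k_to_kill_enemies n groups m (min_k_to_kill_enemies n groups m)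

-- ===== LEMMAS AND PROOFS =====

-- ceiling-division bounds: for 1 ≤ k, c := (g+k-1)//k satisfies g ≤ k*c < g + k
theorem pvCd_bounds (g k : Int) (hk : 1 ≤ k) :
    g ≤ k * PySem.Int.floordiv (g + k - 1) k ∧ k * PySem.Int.floordiv (g + k - 1) k < g + k := by
  have h1 := PySem.Int.floordiv_mul_add_mod (g + k - 1) k
  have h2 := PySem.Int.mod_nonneg (g + k - 1) (by omega : (0:Int) < k)
  have h3 := PySem.Int.mod_lt (g + k - 1) (by omega : (0:Int) < k)
  constructor <;> nlinarith [h1, h2, h3]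

-- per-term antitonicity for non-negative g
theorem pvCd_antitone (g k k' : Int) (hg : 0 ≤ g) (hk : 1 ≤ k) (hkk : k ≤ k') :
    PySem.Int.floordiv (g + k' - 1) k' ≤ PySem.Int.floordiv (g + k - 1) k := by
  have hk' : 1 ≤ k' := le_trans hk hkk
  obtain ⟨hb1, hb2⟩ := pvCd_bounds g k hk
  obtain ⟨hc1, hc2⟩ := pvCd_bounds g k' hk'
  set c := PySem.Int.floordiv (g + k - 1) k with hc
  set c' := PySem.Int.floordiv (g + k' - 1) k' with hc'
  by_contra hlt
  push Not at hlt
  have hc0 : 0 ≤ c := by nlinarith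
  nlinarith

theorem pvMinutes_eq_sum (groups : List Int) (k : Int) :
    pyMinutes groups k = (groups.map (fun g => PySem.Int.floordiv (g + k - 1) k)).sum := by
  unfold pyMinutes
  rw [PySem.List.foldl_add groups (fun g => PySem.Int.floordiv (g + k - 1) k) 0]
  ring

theorem pvMinutes_antitone (groups : List Int) (k k' : Int)
    (hP : ∀ g ∈ groups, 0 ≤ g) (hk : 1 ≤ k) (hkk : k ≤ k') :
    pyMinutes groups k' ≤ pyMinutes groups k := by
  rw [pvMinutes_eq_sum, pvMinutes_eq_sum]
  exact List.sum_le_sum (fun g hg => pvCd_antitone g k k' (hP g hg) hk hkk)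

-- characterisation of A's binary-search loop on a monotone feasibility predicate
theorem pvALoop_char (groups : List Int) (m : Int) (hP : ∀ g ∈ groups, 0 ≤ g) :
    ∀ (N : Nat) (low high : Int), (high - low).toNat ≤ N → 1 ≤ low → low ≤ high →
      low ≤ aLoop groups m low high ∧ aLoop groups m low high ≤ high ∧
      (∀ i, low ≤ i → i < aLoop groups m low high → m < pyMinutes groups i) ∧
      (pyMinutes groups (aLoop groups m low high) ≤ m ∨ aLoop groups m low high = high) := by
  intro N
  induction N with
  | zero =>
    intro low high hN h1 hlh
    have heq : ¬ low < high := by omega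
    rw [aLoop, dif_neg heq]
    exact ⟨le_refl _, hlh, fun i hi1 hi2 => absurd (lt_of_le_of_lt hi1 hi2) (lt_irrefl _),
      Or.inr (by omega)⟩
  | succ N ih =>
    intro low high hN h1 hlh
    by_cases hlt : low < high
    · rw [aLoop, dif_pos hlt]
      have hb := PySem.Int.floordiv_two_mid_bounds (le_of_lt hlt)
      have hmidlt : PySem.Int.floordiv (low + high) 2 < high := by
        rw [PySem.Int.floordiv_lt_iff_lt_mul (by omega : (0:Int) < 2)]; omega
      set mid := PySem.Int.floordiv (low + high) 2 with hmid
      by_cases hfeas : pyMinutes groups mid > m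
      · rw [if_pos hfeas]
        obtain ⟨p1, p2, p3, p4⟩ := ih (mid + 1) high (by omega) (by omega) (by omega)
        refine ⟨by omega, p2, fun i hi1 hi2 => ?_, p4⟩
        by_cases hcase : i ≤ mid
        · have := pvMinutes_antitone groups i mid hP (by omega) hcase
          omega
        · exact p3 i (by omega) hi2
      · rw [if_neg hfeas]
        obtain ⟨p1, p2, p3, p4⟩ := ih low mid (by omega) h1 (by omega)
        refine ⟨p1, by omega, p3, ?_⟩
        rcases p4 with p4 | p4
        · exact Or.inl p4
        · exact Or.inl (by rw [p4]; omega)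
    · rw [aLoop, dif_neg hlt]
      exact ⟨le_refl _, hlh, fun i hi1 hi2 => absurd (lt_of_le_of_lt hi1 hi2) (lt_irrefl _),
        Or.inr (by omega)⟩

-- characterisation of B's grow loop: from a power of two it returns a power of two with 2*result > cap
theorem pvGrow_char (cap : Int) :
    ∀ (N : Nat) (bit : Int), (cap - bit).toNat ≤ N → (∃ s : Nat, bit = 2 ^ s) →
      (∃ t : Nat, growBit cap bit = 2 ^ t) ∧ cap < growBit cap bit * 2 := by
  intro N
  induction N with
  | zero =>
    intro bit hN hpow
    obtain ⟨s, rfl⟩ := hpow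
    have hpos : (0:Int) < 2 ^ s := by positivity
    have hc : ¬ (1 ≤ (2:Int) ^ s ∧ (2:Int) ^ s * 2 ≤ cap) := by omega
    rw [growBit, dif_neg hc]
    exact ⟨⟨s, rfl⟩, by omega⟩
  | succ N ih =>
    intro bit hN hpow
    obtain ⟨s, rfl⟩ := hpow
    have hpos : (0:Int) < 2 ^ s := by positivity
    by_cases hc : 1 ≤ (2:Int) ^ s ∧ (2:Int) ^ s * 2 ≤ cap
    · rw [growBit, dif_pos hc]
      have hstep : (2:Int) ^ s * 2 = 2 ^ (s + 1) := by ring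
      rw [hstep]
      exact ih (2 ^ (s + 1)) (by omega) ⟨s + 1, rfl⟩
    · rw [growBit, dif_neg hc]
      exact ⟨⟨s, rfl⟩, by omega⟩

-- characterisation of B's binary-lifting loop at a power-of-two bit
theorem pvLift_char (groups : List Int) (m tot : Int) (hP : ∀ g ∈ groups, 0 ≤ g) :
    ∀ (t : Nat) (j : Int),
      (j = 0 ∨ (1 ≤ j ∧ j ≤ tot - 1 ∧ m < pyMinutes groups j)) →
      (∀ i, j + 2 * 2 ^ t ≤ i → 1 ≤ i → i ≤ tot - 1 → pyMinutes groups i ≤ m) →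
      (liftLoop groups m tot j (2 ^ t) = 0 ∨
        (1 ≤ liftLoop groups m tot j (2 ^ t) ∧ liftLoop groups m tot j (2 ^ t) ≤ tot - 1 ∧
          m < pyMinutes groups (liftLoop groups m tot j (2 ^ t)))) ∧
      (∀ i, liftLoop groups m tot j (2 ^ t) + 1 ≤ i → 1 ≤ i → i ≤ tot - 1 → pyMinutes groups i ≤ m) := by
  intro t
  induction t with
  | zero =>
    intro j hj hE
    have hj0 : 0 ≤ j := by rcases hj with h | h <;> omega
    have h1 : (2:Int) ^ 0 = 1 := by norm_num
    rw [h1] at hE ⊢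
    rw [liftLoop, dif_pos (by omega : (1:Int) ≤ 1)]
    have hfd : PySem.Int.floordiv 1 2 = 0 := by decide
    rw [hfd]
    by_cases hc : j + 1 ≤ tot - 1 ∧ pyMinutes groups (j + 1) > m
    · rw [if_pos hc, liftLoop, dif_neg (by omega : ¬ (1:Int) ≤ 0)]
      exact ⟨Or.inr ⟨by omega, hc.1, hc.2⟩, fun i hi h1i h2i => hE i (by omega) h1i h2i⟩
    · rw [if_neg hc, liftLoop, dif_neg (by omega : ¬ (1:Int) ≤ 0)]
      refine ⟨hj, fun i hi h1i h2i => ?_⟩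
      by_cases hfar : j + 2 ≤ i
      · exact hE i (by omega) h1i h2i
      · have hieq : i = j + 1 := by omega
        push Not at hc
        subst hieq
        exact hc h2i
  | succ t ih =>
    intro j hj hE
    have hj0 : 0 ≤ j := by rcases hj with h | h <;> omega
    have hpos : (0:Int) < 2 ^ (t + 1) := by positivity
    have hpos' : (0:Int) < 2 ^ t := by positivity
    have hstep : (2:Int) ^ (t + 1) = 2 ^ t * 2 := by ring
    rw [liftLoop, dif_pos (by omega : (1:Int) ≤ 2 ^ (t + 1))]
    have hfd : PySem.Int.floordiv ((2:Int) ^ (t + 1)) 2 = 2 ^ t := by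
      rw [hstep, PySem.Int.floordiv_eq_ediv_of_pos (by omega : (0:Int) < 2)]
      exact Int.mul_ediv_cancel _ (by norm_num)
    rw [hfd]
    by_cases hc : j + 2 ^ (t + 1) ≤ tot - 1 ∧ pyMinutes groups (j + 2 ^ (t + 1)) > m
    · rw [if_pos hc]
      exact ih (j + 2 ^ (t + 1)) (Or.inr ⟨by omega, hc.1, hc.2⟩)
        (fun i hi h1i h2i => hE i (by omega) h1i h2i)
    · rw [if_neg hc]
      push Not at hc
      by_cases hcand : j + 2 ^ (t + 1) ≤ tot - 1
      · have hfeas : pyMinutes groups (j + 2 ^ (t + 1)) ≤ m := hc hcand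
        refine ih j hj (fun i hi h1i h2i => ?_)
        have := pvMinutes_antitone groups (j + 2 ^ (t + 1)) i hP (by omega) (by omega)
        omega
      · exact ih j hj (fun i hi h1i h2i => by omega)

-- ===== VERDICT (by name: the statement is the Claim_ definition above) =====
theorem min_k_to_kill_enemies_spec : Claim_equal_min_k_to_kill_enemies := by
  intro n groups m hDom hPre
  have key : aLoop groups m 1 groups.sum
      = liftLoop groups m groups.sum 0 (growBit (groups.sum - 1) 1) + 1 := by
    set tot := groups.sum with htot
    by_cases h2 : tot ≤ 1
    · rw [aLoop, dif_neg (by omega : ¬ (1:Int) < tot)]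
      rw [growBit, dif_neg (by rintro ⟨-, hb⟩; omega : ¬ ((1:Int) ≤ 1 ∧ (1:Int) * 2 ≤ tot - 1))]
      rw [liftLoop, dif_pos (by omega : (1:Int) ≤ 1)]
      rw [if_neg (by rintro ⟨ha, -⟩; omega : ¬ ((0:Int) + 1 ≤ tot - 1 ∧ pyMinutes groups (0 + 1) > m))]
      have hfd : PySem.Int.floordiv 1 2 = 0 := by decide
      rw [hfd, liftLoop, dif_neg (by omega : ¬ (1:Int) ≤ 0)]
      omega
    · have hP : ∀ g ∈ groups, 0 ≤ g := by
        rcases hPre with h | h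
        · exact h
        · exact absurd h (by omega)
      obtain ⟨⟨t, hbit⟩, hcap⟩ :=
        pvGrow_char (tot - 1) (tot - 1 - 1).toNat 1 (by omega) ⟨0, by norm_num⟩
      rw [hbit] at hcap ⊢
      have hpos : (0:Int) < 2 ^ t := by positivity
      obtain ⟨q1, q2⟩ := pvLift_char groups m tot hP t 0 (Or.inl rfl)
        (fun i hi h1i h2i => absurd hi (by omega))
      obtain ⟨p1, p2, p3, p4⟩ :=
        pvALoop_char groups m hP (tot - 1).toNat 1 tot (by omega) (by omega) (by omega)
      set rA := aLoop groups m 1 tot with hra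
      set j := liftLoop groups m tot 0 (2 ^ t) with hj
      rcases lt_trichotomy rA (j + 1) with hlt | heq | hgt
      · exfalso
        rcases q1 with hj0 | ⟨hj1, hjle, hjinf⟩
        · omega
        · have h1a : m < pyMinutes groups rA := by
            have := pvMinutes_antitone groups rA j hP (by omega) (by omega)
            omega
          rcases p4 with h | h <;> omega
      · exact heq
      · exfalso
        have hfeasB : m < pyMinutes groups (j + 1) :=
          p3 (j + 1) (by rcases q1 with h | h <;> omega) hgt
        by_cases hle : j + 1 ≤ tot - 1
        · have := q2 (j + 1) (by omega) (by rcases q1 with h | h <;> omega) hle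
          omega
        · rcases q1 with h | h <;> omega
  simp only [Spec_min_k_to_kill_enemies, min_k_to_kill_enemies, min_k_to_kill_enemies_alt, key]
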